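-- pv_equiv track=rewrite | github.com/LucasBarrientos7/The_Rubber_Wizard | Juego/Funciones.py | dameUltimaSilaba
-- ===== SOURCE A (Python) =====
-- def dameUltimaSilaba(enSilabas):
--     ultimaSilaba=""
--     for letra in (enSilabas):
--         if (letra=="-"):
--             ultimaSilaba=""
--         else:
--             ultimaSilaba=ultimaSilaba+letra
--     return ultimaSilaba
-- ===== SOURCE B (Python) =====
-- def dameUltimaSilaba(enSilabas):
--     return enSilabas[enSilabas.rfind("-") + 1:]
-- ===== Notes on version B (the rewrite author's own statement) =====
-- stated objective: faster
-- what changed: Replaces the per-character loop with a reset-on-hyphen accumulator by a single rfind for the last hyphen followed by one slice.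
import Mathlib
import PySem

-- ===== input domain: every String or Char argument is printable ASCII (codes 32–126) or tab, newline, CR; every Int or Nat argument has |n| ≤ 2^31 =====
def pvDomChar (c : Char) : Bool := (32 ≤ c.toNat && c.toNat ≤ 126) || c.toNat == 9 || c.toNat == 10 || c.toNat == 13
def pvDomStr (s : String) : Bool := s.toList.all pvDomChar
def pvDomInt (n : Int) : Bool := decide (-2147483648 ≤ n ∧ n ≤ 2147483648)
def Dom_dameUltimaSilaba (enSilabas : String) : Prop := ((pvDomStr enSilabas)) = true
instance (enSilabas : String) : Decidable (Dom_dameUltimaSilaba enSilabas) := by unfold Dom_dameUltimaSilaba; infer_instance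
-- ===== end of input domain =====

-- B replaces A's reset-on-hyphen accumulator loop with one rfind for the last '-' plus a single slice (idiomatic).


-- ===== PORT A =====
-- accumulate the current syllable, resetting on '-' (string concat ported over List Char)
def dameUltimaSilaba (enSilabas : String) : String :=
  String.ofList
    (enSilabas.toList.foldl
      (fun ultimaSilaba letra => if letra = '-' then [] else ultimaSilaba ++ [letra]) [])

-- ===== PORT B =====
-- enSilabas[enSilabas.rfind("-") + 1:]
def dameUltimaSilaba_alt (enSilabas : String) : String :=
  PySem.Str.slice enSilabas (some (PySem.Str.rfind enSilabas "-" + 1)) none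

-- ===== PRECONDITION & SPEC =====
def Spec_dameUltimaSilaba (enSilabas : String) (out : String) : Prop := out = dameUltimaSilaba_alt enSilabas
instance (enSilabas : String) (out : String) : Decidable (Spec_dameUltimaSilaba enSilabas out) := by unfold Spec_dameUltimaSilaba; infer_instance

-- ===== CLAIM (what is proved, stated in full; the proofs are below) =====
def Claim_equal_dameUltimaSilaba : Prop := ∀ (enSilabas : String), Dom_dameUltimaSilaba enSilabas → Spec_dameUltimaSilaba enSilabas (dameUltimaSilaba enSilabas)

-- ===== LEMMAS AND PROOFS =====

theorem pv_go_bounds (s sub : List Char) (k : Nat) :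
    -1 ≤ PySem.Chars.rfind.go s sub k ∧ PySem.Chars.rfind.go s sub k ≤ (k : Int) := by
  induction k with
  | zero => rw [PySem.Chars.rfind.go.eq_1]; split <;> simp
  | succ j ih =>
    rw [PySem.Chars.rfind.go.eq_2]
    split
    · constructor <;> push_cast <;> omega
    · refine ⟨ih.1, ?_⟩; have := ih.2; push_cast; omega

theorem pv_go_append (cs : List Char) (c : Char) (k : Nat) (hk : k < cs.length) :
    PySem.Chars.rfind.go (cs ++ [c]) ['-'] k = PySem.Chars.rfind.go cs ['-'] k := by
  induction k with
  | zero =>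
    rw [PySem.Chars.rfind.go.eq_1, PySem.Chars.rfind.go.eq_1]
    cases cs with
    | nil => simp at hk
    | cons x l => simp [List.isPrefixOf]
  | succ j ih =>
    rw [PySem.Chars.rfind.go.eq_2, PySem.Chars.rfind.go.eq_2]
    have hd : List.drop (j + 1) (cs ++ [c]) = List.drop (j + 1) cs ++ [c] :=
      List.drop_append_of_le_length (by omega)
    have hne : List.drop (j + 1) cs ≠ [] := by
      intro h; have := List.length_drop (l := cs) (i := j + 1); rw [h] at this; simp at this; omega
    obtain ⟨x, l, hxl⟩ := List.exists_cons_of_ne_nil hne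
    rw [hd, hxl]
    simp only [List.cons_append, List.isPrefixOf]
    split
    · rfl
    · exact ih (by omega)

theorem pv_rfind_append (cs : List Char) (c : Char) :
    PySem.Chars.rfind (cs ++ [c]) ['-'] =
      if c = '-' then (cs.length : Int) else PySem.Chars.rfind cs ['-'] := by
  unfold PySem.Chars.rfind
  have hlen : (cs ++ [c]).length = cs.length + 1 := by simp
  rw [hlen, PySem.Chars.rfind.go.eq_2]
  have h1 : List.drop (cs.length + 1) (cs ++ [c]) = [] := by simp
  have hfe : (['-'].isPrefixOf ([] : List Char)) = false := rfl
  rw [h1, hfe]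
  simp only [Bool.false_eq_true, if_false]
  cases hn : cs.length with
  | zero =>
    have hcs : cs = [] := List.eq_nil_of_length_eq_zero hn
    subst hcs
    by_cases hc : c = '-'
    · subst hc; decide
    · have hb : ('-' == c) = false := beq_eq_false_iff_ne.mpr (fun h => hc h.symm)
      rw [PySem.Chars.rfind.go.eq_1, PySem.Chars.rfind.go.eq_1]
      simp [List.isPrefixOf, hb, hc]
  | succ m =>
    rw [PySem.Chars.rfind.go.eq_2, PySem.Chars.rfind.go.eq_2]
    have hd2 : List.drop (m + 1) cs = [] := by apply List.drop_eq_nil_of_le; omega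
    have hdc : List.drop (m + 1) (cs ++ [c]) = [c] := by
      rw [List.drop_append_of_le_length (by omega), hd2]; rfl
    rw [hdc, hd2, hfe]
    have hp : (['-'].isPrefixOf [c]) = ('-' == c) := by simp [List.isPrefixOf]
    rw [hp]
    by_cases hc : c = '-'
    · subst hc; simp
    · have hb : ('-' == c) = false := beq_eq_false_iff_ne.mpr (fun h => hc h.symm)
      rw [hb]
      simp only [Bool.false_eq_true, if_false, if_neg hc]
      exact pv_go_append cs c m (by omega)

theorem pv_rfind_lt (cs : List Char) :
    PySem.Chars.rfind cs ['-'] < (cs.length : Int) := by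
  unfold PySem.Chars.rfind
  have hfe : (['-'].isPrefixOf ([] : List Char)) = false := rfl
  cases hn : cs.length with
  | zero =>
    have hcs : cs = [] := List.eq_nil_of_length_eq_zero hn
    subst hcs
    rw [PySem.Chars.rfind.go.eq_1, hfe]
    simp
  | succ m =>
    rw [PySem.Chars.rfind.go.eq_2]
    have hd : List.drop (m + 1) cs = [] := by apply List.drop_eq_nil_of_le; omega
    rw [hd, hfe]
    simp only [Bool.false_eq_true, if_false]
    have := (pv_go_bounds cs ['-'] m).2
    push_cast
    omega

theorem pv_rfind_ge (cs : List Char) : -1 ≤ PySem.Chars.rfind cs ['-'] := by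
  unfold PySem.Chars.rfind
  exact (pv_go_bounds cs ['-'] cs.length).1

theorem pv_main (cs : List Char) :
    cs.foldl (fun acc letra => if letra = '-' then [] else acc ++ [letra]) [] =
      PySem.List.slice cs (some (PySem.Chars.rfind cs ['-'] + 1)) none := by
  induction cs using List.reverseRecOn with
  | nil => rfl
  | append_singleton l c ih =>
    rw [List.foldl_append, pv_rfind_append]
    simp only [List.foldl_cons, List.foldl_nil]
    by_cases hc : c = '-'
    · rw [if_pos hc, if_pos hc]
      rw [PySem.List.slice_from (l ++ [c]) (show (0:Int) ≤ (l.length : Int) + 1 by omega)]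
      have ht : ((l.length : Int) + 1).toNat = l.length + 1 := by omega
      rw [ht]
      symm
      apply List.drop_eq_nil_of_le
      simp
    · have hb := pv_rfind_ge l
      have hlt := pv_rfind_lt l
      rw [if_neg hc, if_neg hc, ih]
      rw [PySem.List.slice_from l (show (0:Int) ≤ PySem.Chars.rfind l ['-'] + 1 by omega),
        PySem.List.slice_from (l ++ [c]) (show (0:Int) ≤ PySem.Chars.rfind l ['-'] + 1 by omega)]
      rw [List.drop_append_of_le_length (by omega)]

-- ===== VERDICT (by name: the statement is the Claim_ definition above) =====
theorem dameUltimaSilaba_spec : Claim_equal_dameUltimaSilaba := by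
  intro s _
  unfold Spec_dameUltimaSilaba dameUltimaSilaba dameUltimaSilaba_alt PySem.Str.slice
  rw [PySem.Str.rfind_eq]
  exact congrArg String.ofList (pv_main s.toList)
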